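-- pv_equiv track=rewrite | github.com/to-aoki/lora_finetuning | src/template.py | count_placeholders
-- ===== SOURCE A (Python) =====
-- def count_placeholders(format_string):
--     placeholders = 0
--     in_brace = False
--     for char in format_string:
--         if char == "{":
--             in_brace = True
--         elif char == "}" and in_brace:
--             placeholders += 1
--             in_brace = False
--     return placeholders
-- ===== SOURCE B (Python) =====
-- def count_placeholders(format_string):
--     # Split at every '}'; each segment before a '}' yields one placeholder
--     # iff it contains a '{' (the state machine's in_brace is reset after every '}').
--     parts = format_string.split("}")
--     return sum("{" in part for part in parts[:-1])
-- ===== Notes on version B (the rewrite author's own statement) =====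
-- stated objective: faster
-- what changed: Replaces the explicit character-by-character boolean state machine with a split-on-'}' pass that counts the segments (all but the last) containing a '{'.
import Mathlib
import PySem

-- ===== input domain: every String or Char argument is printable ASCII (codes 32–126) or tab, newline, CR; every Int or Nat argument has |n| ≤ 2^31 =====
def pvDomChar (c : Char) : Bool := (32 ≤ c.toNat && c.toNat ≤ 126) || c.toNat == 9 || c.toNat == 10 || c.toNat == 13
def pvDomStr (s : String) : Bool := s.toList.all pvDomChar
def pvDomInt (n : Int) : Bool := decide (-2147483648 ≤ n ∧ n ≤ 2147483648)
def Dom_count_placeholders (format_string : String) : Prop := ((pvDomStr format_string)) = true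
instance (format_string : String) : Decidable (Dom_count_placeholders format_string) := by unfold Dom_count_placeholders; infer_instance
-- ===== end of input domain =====

-- B replaces A's per-character boolean state machine by splitting on '}' and
-- counting the non-final segments that contain a '{' (idiomatic; same O(n) cost).


-- ===== PORT A =====
def count_placeholders (format_string : String) : Int :=
  (format_string.toList.foldl
    (fun st c =>
      if c = '{' then (st.1, true)
      else if c = '}' ∧ st.2 = true then (st.1 + 1, false)
      else st)
    ((0 : Int), false)).1

-- ===== PORT B =====
def count_placeholders_alt (format_string : String) : Int :=
  (PySem.List.slice (PySem.Chars.splitOn format_string.toList ['}']) none (some (-1))).foldl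
    (fun acc part => if PySem.Chars.isIn ['{'] part = true then acc + 1 else acc) 0

-- ===== PRECONDITION & SPEC =====
def Spec_count_placeholders (format_string : String) (out : Int) : Prop := out = count_placeholders_alt format_string
instance (format_string : String) (out : Int) : Decidable (Spec_count_placeholders format_string out) := by unfold Spec_count_placeholders; infer_instance

-- ===== CLAIM (what is proved, stated in full; the proofs are below) =====
def Claim_equal_count_placeholders : Prop := ∀ (format_string : String), Dom_count_placeholders format_string → Spec_count_placeholders format_string (count_placeholders format_string)

-- ===== LEMMAS AND PROOFS =====

-- A's loop, count only, as a structural recursion (proof helper).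
def pvPloop : List Char → Bool → Int
  | [], _ => 0
  | c :: r, b =>
    if c = '{' then pvPloop r true
    else if c = '}' then (if b then 1 + pvPloop r false else pvPloop r false)
    else pvPloop r b

lemma pv_foldA (l : List Char) (p : Int) (b : Bool) :
    (l.foldl
      (fun st c =>
        if c = '{' then (st.1, true)
        else if c = '}' ∧ st.2 = true then (st.1 + 1, false)
        else st) (p, b)).1 = p + pvPloop l b := by
  induction l generalizing p b with
  | nil => simp [pvPloop]
  | cons c r ih =>
    by_cases h1 : c = '{'
    · simp [h1, pvPloop, ih]
    · by_cases h2 : c = '}'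
      · cases b <;> simp [h2, pvPloop, ih] <;> ring
      · simp [h1, h2, pvPloop, ih]

lemma pv_isIn_singleton (c : Char) (l : List Char) :
    PySem.Chars.isIn [c] l = l.contains c := by
  by_cases h : c ∈ l
  · obtain ⟨s, t, rfl⟩ := List.append_of_mem h
    have hinf : [c] <:+: s ++ c :: t := ⟨s, t, by simp⟩
    simp [(PySem.Chars.isIn_iff_infix [c] _).2 hinf, h]
  · have : ¬ ([c] <:+: l) := fun hinf => h (hinf.subset (List.mem_singleton_self c))
    simp [PySem.Chars.isIn_eq_false_iff _ _ |>.2 this, h]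

lemma pv_go_inv (l : List Char) : ∀ (fuel : Nat) (cur : List Char) (acc : List (List Char)),
    l.length < fuel →
    (((PySem.Chars.splitOn.go ['}'] fuel l cur acc).dropLast.countP
        (fun p => PySem.Chars.isIn ['{'] p) : Nat) : Int)
      = ((acc.countP (fun p => PySem.Chars.isIn ['{'] p) : Nat) : Int)
        + pvPloop l (cur.contains '{') := by
  induction l with
  | nil =>
    intro fuel cur acc h
    match fuel, h with
    | fuel + 1, _ =>
      simp [PySem.Chars.splitOn.go, pvPloop]
  | cons c r ih =>
    intro fuel cur acc h
    match fuel, h with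
    | fuel + 1, h =>
      have hr : r.length < fuel := by simpa using Nat.lt_of_succ_lt_succ h
      by_cases hc : c = '}'
      · have hpre : List.isPrefixOf ['}'] (c :: r) = true := by simp [List.isPrefixOf, hc]
        rw [PySem.Chars.splitOn.go.eq_def]
        simp only [hpre, if_pos, List.length_cons]
        rw [show List.drop (List.length ([] : List Char) + 1) (c :: r) = r from rfl]
        rw [ih fuel [] (cur.reverse :: acc) hr]
        rw [List.countP_cons]
        simp only [pv_isIn_singleton, List.contains_reverse]
        simp only [pvPloop, hc, if_pos]
        cases hcur : cur.contains '{' <;> simp [List.countP_cons] <;> push_cast <;> ring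
      · have hpre : List.isPrefixOf ['}'] (c :: r) = false := by
          simp [List.isPrefixOf]; exact fun hh => hc hh.symm
        rw [PySem.Chars.splitOn.go.eq_def]
        simp only [hpre, Bool.false_eq_true, if_false]
        rw [ih fuel (c :: cur) acc hr]
        by_cases h1 : c = '{'
        · simp [pvPloop, h1]
        · have h1' : ¬ ('{' = c) := fun e => h1 e.symm
          simp [pvPloop, h1, hc, h1']

-- ===== VERDICT (by name: the statement is the Claim_ definition above) =====
theorem count_placeholders_spec : Claim_equal_count_placeholders := by
  intro s _
  unfold Spec_count_placeholders count_placeholders count_placeholders_alt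
  rw [pv_foldA s.toList 0 false]
  rw [PySem.List.slice_to_neg_one, PySem.List.foldl_count_if]
  show (0 : Int) + pvPloop s.toList false =
    0 + (((PySem.Chars.splitOn s.toList ['}']).dropLast.countP
      (fun p => PySem.Chars.isIn ['{'] p) : Nat) : Int)
  rw [show PySem.Chars.splitOn s.toList ['}']
        = PySem.Chars.splitOn.go ['}'] (s.toList.length + 1) s.toList [] [] from rfl]
  rw [pv_go_inv s.toList (s.toList.length + 1) [] [] (Nat.lt_succ_self _)]
  simp
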